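-- pv_equiv track=rewrite | github.com/over7-maker/Advanced-Multi-Agent-Intelligence-System | .github/scripts/ai_automated_implementer.py | _eliminate_duplication
-- ===== SOURCE A (Python) =====
-- def _eliminate_duplication(content: str) -> str:
--     """Eliminate code duplication"""
--     # This is a simplified implementation
--     # In reality, this would use more sophisticated duplication detection
--
--     lines = content.split('\n')
--     new_lines = []
--     seen_lines = set()
--
--     for line in lines:
--         stripped = line.strip()
--         if stripped and stripped not in seen_lines:
--             new_lines.append(line)
--             seen_lines.add(stripped)
--         elif stripped:
--             # Add comment for removed duplicate
--             new_lines.append(f"# Removed duplicate: {stripped}")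
--         else:
--             new_lines.append(line)
--
--     return '\n'.join(new_lines)
-- ===== SOURCE B (Python) =====
-- def _eliminate_duplication(content: str) -> str:
--     """Eliminate code duplication (index-table two-pass variant)"""
--     lines = content.split('\n')
--     first_idx = {}
--     for i, line in enumerate(lines):
--         stripped = line.strip()
--         if stripped:
--             first_idx.setdefault(stripped, i)
--     out = []
--     for i, line in enumerate(lines):
--         stripped = line.strip()
--         if not stripped:
--             out.append(line)
--         elif first_idx[stripped] == i:
--             out.append(line)
--         else:
--             out.append(f"# Removed duplicate: {stripped}")
--     return '\n'.join(out)
-- ===== Notes on version B (the rewrite author's own statement) =====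
-- stated objective: alternative
-- what changed: Replaces the incremental seen-set of A with an up-front first-occurrence index table built by setdefault, then a positional second pass that keeps a line iff its index equals the table entry.
import Mathlib
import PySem

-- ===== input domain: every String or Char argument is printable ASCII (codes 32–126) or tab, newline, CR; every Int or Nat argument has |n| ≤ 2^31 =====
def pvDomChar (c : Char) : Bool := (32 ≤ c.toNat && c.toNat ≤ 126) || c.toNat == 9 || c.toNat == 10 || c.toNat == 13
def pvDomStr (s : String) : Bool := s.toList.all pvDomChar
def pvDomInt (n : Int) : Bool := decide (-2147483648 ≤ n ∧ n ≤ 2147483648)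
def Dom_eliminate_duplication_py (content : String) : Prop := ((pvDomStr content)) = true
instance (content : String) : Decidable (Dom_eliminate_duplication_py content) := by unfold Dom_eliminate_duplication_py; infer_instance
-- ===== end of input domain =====

-- B replaces A's incremental seen-set with a first-occurrence index table plus a positional second pass (same cost, different decomposition).


-- content.split('\n'): sep is the nonempty literal "\n", so split? is always `some` (shared by both ports)
def pvSplitLines (content : String) : List String := (PySem.Str.split? content "\n").getD []

-- the f-string "# Removed duplicate: {stripped}" (shared literal)
def pvComment (s : String) : String := String.ofList ("# Removed duplicate: ".toList ++ s.toList)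

-- ===== PORT A =====
-- loop body of A: state = (new_lines, seen_lines)
def pvAStep (st : List String × PySem.Set String) (line : String) : List String × PySem.Set String :=
  let stripped := PySem.Str.strip line
  if stripped ≠ "" ∧ stripped ∉ st.2 then (st.1 ++ [line], PySem.Set.add st.2 stripped)
  else if stripped ≠ "" then (st.1 ++ [pvComment stripped], st.2)
  else (st.1 ++ [line], st.2)

def eliminate_duplication_py (content : String) : String :=
  let lines := pvSplitLines content
  PySem.Str.join "\n" ((lines.foldl pvAStep ([], PySem.Set.empty)).1)

-- ===== PORT B =====
-- first pass: first_idx.setdefault(stripped, i) for nonempty stripped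
def pvBStep1 (d : PySem.Dict String Int) (p : Int × String) : PySem.Dict String Int :=
  let stripped := PySem.Str.strip p.2
  if stripped ≠ "" then d.setdefault stripped p.1 else d

-- second pass: keep a line iff its index is the recorded first occurrence
def pvBStep2 (fi : PySem.Dict String Int) (acc : List String) (p : Int × String) : List String :=
  let stripped := PySem.Str.strip p.2
  if stripped = "" then acc ++ [p.2]
  else if fi.get? stripped = some p.1 then acc ++ [p.2]
  else acc ++ [pvComment stripped]

def eliminate_duplication_py_alt (content : String) : String :=
  let lines := pvSplitLines content
  let first_idx := (PySem.List.enumerate lines 0).foldl pvBStep1 PySem.Dict.empty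
  PySem.Str.join "\n" ((PySem.List.enumerate lines 0).foldl (pvBStep2 first_idx) [])

-- ===== PRECONDITION & SPEC =====
def Spec_eliminate_duplication_py (content : String) (out : String) : Prop := out = eliminate_duplication_py_alt content
instance (content : String) (out : String) : Decidable (Spec_eliminate_duplication_py content out) := by unfold Spec_eliminate_duplication_py; infer_instance

-- ===== CLAIM (what is proved, stated in full; the proofs are below) =====
def Claim_equal_eliminate_duplication_py : Prop := ∀ (content : String), Dom_eliminate_duplication_py content → Spec_eliminate_duplication_py content (eliminate_duplication_py content)

-- ===== LEMMAS AND PROOFS =====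

-- the dict built by pass 1 looks up s at the FIRST enumerated pair whose stripped line is s
theorem pvBuild_get (l : List (Int × String)) (d : PySem.Dict String Int) (s : String) :
    (l.foldl pvBStep1 d).get? s =
      ((d.get? s).orElse (fun _ => (l.find? (fun p => PySem.Str.strip p.2 == s && PySem.Str.strip p.2 != "")).map (·.1))) := by
  induction l generalizing d with
  | nil => simp
  | cons p t ih =>
    simp only [List.foldl_cons, List.find?_cons]
    by_cases hpe : PySem.Str.strip p.2 = ""
    · simp only [pvBStep1, hpe, ne_eq, not_true_eq_false, if_neg, not_false_iff]
      simp [ih d]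
    · simp only [pvBStep1, ne_eq, hpe, not_false_iff, if_pos]
      by_cases hps : PySem.Str.strip p.2 = s
      · rw [ih, hps, PySem.Dict.get?_setdefault_self]
        have hb : (s != "") = true := by simp [hps ▸ hpe]
        cases h : d.get? s <;> simp [hb, Option.orElse]
      · have hfind : ((PySem.Str.strip p.2 == s && PySem.Str.strip p.2 != "")) = false := by
          simp [hps]
        rw [hfind, ih, PySem.Dict.get?_setdefault_of_ne _ _ (by exact fun h => hps h.symm)]

-- if no line of the prefix strips to s, the table maps s to the prefix length (the head's index)
theorem pvCond_fresh (pref rest : List String) (l : String) (hs : PySem.Str.strip l ≠ "")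
    (h : ¬ ∃ l' ∈ pref, PySem.Str.strip l' = PySem.Str.strip l) :
    ((PySem.List.enumerate (pref ++ l :: rest) 0).foldl pvBStep1 PySem.Dict.empty).get?
      (PySem.Str.strip l) = some (pref.length : Int) := by
  rw [pvBuild_get]
  rw [PySem.List.enumerate_append, List.find?_append]
  have h1 : (PySem.List.enumerate pref 0).find?
      (fun p => PySem.Str.strip p.2 == PySem.Str.strip l && PySem.Str.strip p.2 != "") = none := by
    rw [List.find?_eq_none]
    intro p hp
    have := (PySem.List.mem_enumerate_iff _ _ _).mp hp
    obtain ⟨k, hk, rfl⟩ := this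
    have hmem : pref[k] ∈ pref := List.getElem_mem hk
    simp only [Bool.and_eq_true, beq_iff_eq, bne_iff_ne, ne_eq]
    intro hcontra
    exact h ⟨pref[k], hmem, hcontra.1⟩
  rw [h1]
  rw [PySem.List.enumerate_cons, List.find?_cons]
  have hpred : (PySem.Str.strip l != "") = true := by simp [hs]
  simp [hpred, Option.orElse]

-- if some line of the prefix strips to s, the table does NOT map s to the head's index
theorem pvCond_dup (pref rest : List String) (l : String)
    (h : ∃ l' ∈ pref, PySem.Str.strip l' = PySem.Str.strip l ∧ PySem.Str.strip l' ≠ "") :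
    ((PySem.List.enumerate (pref ++ l :: rest) 0).foldl pvBStep1 PySem.Dict.empty).get?
      (PySem.Str.strip l) ≠ some (pref.length : Int) := by
  rw [pvBuild_get]
  rw [PySem.List.enumerate_append, List.find?_append]
  have h1 : ((PySem.List.enumerate pref 0).find?
      (fun p => PySem.Str.strip p.2 == PySem.Str.strip l && PySem.Str.strip p.2 != "")).isSome := by
    rw [List.find?_isSome]
    obtain ⟨l', hl', hstrip, hne⟩ := h
    obtain ⟨k, hk, rfl⟩ := List.getElem_of_mem hl'
    refine ⟨(0 + (k : Int), pref[k]), (PySem.List.mem_enumerate_iff _ _ _).mpr ⟨k, hk, rfl⟩, ?_⟩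
    rw [hstrip] at hne
    simp [hstrip, hne]
  obtain ⟨p, hp⟩ := Option.isSome_iff_exists.mp h1
  rw [hp]
  have hpmem := List.mem_of_find?_eq_some hp
  obtain ⟨k, hk, rfl⟩ := (PySem.List.mem_enumerate_iff _ _ _).mp hpmem
  intro hcontra
  simp [Option.orElse] at hcontra
  omega

-- main loop correspondence: A's fold over the suffix with seen = nonempty stripped lines of the
-- prefix equals B's second pass over the enumerated suffix, for the table built from the whole list
theorem pvMain (lines : List String) :
    ∀ (suffix pref : List String) (acc : List String) (seen : PySem.Set String),
      lines = pref ++ suffix →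
      (∀ s, s ∈ seen ↔ ∃ l ∈ pref, PySem.Str.strip l = s ∧ s ≠ "") →
      (suffix.foldl pvAStep (acc, seen)).1 =
        (PySem.List.enumerate suffix (pref.length : Int)).foldl
          (pvBStep2 ((PySem.List.enumerate lines 0).foldl pvBStep1 PySem.Dict.empty)) acc := by
  intro suffix
  induction suffix with
  | nil => intro pref acc seen _ _; simp
  | cons l t ih =>
    intro pref acc seen hlines hinv
    set FI := (PySem.List.enumerate lines 0).foldl pvBStep1 PySem.Dict.empty with hFI
    rw [PySem.List.enumerate_cons, List.foldl_cons, List.foldl_cons]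
    have hpref1 : lines = (pref ++ [l]) ++ t := by simp [hlines]
    have hlen1 : ((pref ++ [l]).length : Int) = (pref.length : Int) + 1 := by
      simp
    by_cases hs : PySem.Str.strip l = ""
    · -- blank line: both keep it, seen/table unchanged
      have hA : pvAStep (acc, seen) l = (acc ++ [l], seen) := by
        simp [pvAStep, hs]
      have hB : pvBStep2 FI acc ((pref.length : Int), l) = acc ++ [l] := by
        simp [pvBStep2, hs]
      rw [hA, hB, ← hlen1]
      apply ih (pref ++ [l]) _ seen hpref1
      intro s
      rw [hinv s]
      constructor
      · rintro ⟨l', hl', h1, h2⟩; exact ⟨l', by simp [hl'], h1, h2⟩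
      · rintro ⟨l', hl', h1, h2⟩
        rcases List.mem_append.mp hl' with h | h
        · exact ⟨l', h, h1, h2⟩
        · simp at h; subst h; rw [hs] at h1; exact absurd h1.symm h2
    · by_cases hmem : PySem.Str.strip l ∈ seen
      · -- duplicate: A emits the comment; B's table points at an earlier index
        have hA : pvAStep (acc, seen) l = (acc ++ [pvComment (PySem.Str.strip l)], seen) := by
          simp [pvAStep, hs, hmem]
        obtain ⟨l', hl', h1, h2⟩ := (hinv _).mp hmem
        have hne : FI.get? (PySem.Str.strip l) ≠ some (pref.length : Int) := by
          rw [hFI, hlines]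
          exact pvCond_dup pref t l ⟨l', hl', h1, by rw [h1]; exact h2⟩
        have hB : pvBStep2 FI acc ((pref.length : Int), l) = acc ++ [pvComment (PySem.Str.strip l)] := by
          simp [pvBStep2, hs, hne]
        rw [hA, hB, ← hlen1]
        apply ih (pref ++ [l]) _ seen hpref1
        intro s
        rw [hinv s]
        constructor
        · rintro ⟨l'', hl'', k1, k2⟩; exact ⟨l'', by simp [hl''], k1, k2⟩
        · rintro ⟨l'', hl'', k1, k2⟩
          rcases List.mem_append.mp hl'' with h | h
          · exact ⟨l'', h, k1, k2⟩
          · simp at h; subst h; exact ⟨l', hl', h1.trans k1, k2⟩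
      · -- first occurrence: both keep the line; A records it, B's table points here
        have hA : pvAStep (acc, seen) l = (acc ++ [l], PySem.Set.add seen (PySem.Str.strip l)) := by
          simp [pvAStep, hs, hmem]
        have hfresh : ¬ ∃ l' ∈ pref, PySem.Str.strip l' = PySem.Str.strip l := by
          rintro ⟨l', hl', h1⟩
          exact hmem ((hinv _).mpr ⟨l', hl', h1, hs⟩)
        have heq : FI.get? (PySem.Str.strip l) = some (pref.length : Int) := by
          rw [hFI, hlines]; exact pvCond_fresh pref t l hs hfresh
        have hB : pvBStep2 FI acc ((pref.length : Int), l) = acc ++ [l] := by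
          simp [pvBStep2, hs, heq]
        rw [hA, hB, ← hlen1]
        apply ih (pref ++ [l]) _ _ hpref1
        intro s
        rw [PySem.Set.mem_add, hinv s]
        constructor
        · rintro (⟨l'', hl'', k1, k2⟩ | rfl)
          · exact ⟨l'', by simp [hl''], k1, k2⟩
          · exact ⟨l, by simp, rfl, hs⟩
        · rintro ⟨l'', hl'', k1, k2⟩
          rcases List.mem_append.mp hl'' with h | h
          · exact Or.inl ⟨l'', h, k1, k2⟩
          · simp at h; subst h; exact Or.inr k1.symm

-- ===== VERDICT (by name: the statement is the Claim_ definition above) =====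
theorem eliminate_duplication_py_spec : Claim_equal_eliminate_duplication_py := by
  intro content _
  unfold Spec_eliminate_duplication_py
  exact congrArg (PySem.Str.join "\n")
    (pvMain (pvSplitLines content) (pvSplitLines content) [] [] PySem.Set.empty (by simp)
      (by simp [PySem.Set.empty]))
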